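-- pv_equiv track=rewrite | github.com/anands-repo/hello | python/PileupContainer.py | alnToCigar
-- ===== SOURCE A (Python) =====
-- BAM_CMATCH     = 0;
--
-- BAM_CINS       = 1;
--
-- BAM_CDEL       = 2;
--
-- def alnToCigar(alignment):
--     """
--     From a Bio.pairwise2 alignment, obtain cigartuples
--
--     :param alignment: list
--         Alignment between two sequences
--
--     :return: list
--         Cigartuples list
--     """
--     state = None;
--     counter = 0;
--     cigars = [];
--
--     for item in alignment:
--         if (item[0] != '-') and (item[1] != '-'):
--             nextState = BAM_CMATCH;
--         elif (item[0] == '-') and (item[1] != '-'):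
--             nextState = BAM_CINS;
--         elif (item[0] != '-') and (item[1] == '-'):
--             nextState = BAM_CDEL;
--         else:
--             raise ValueError("Unknown type of alignment entry");
--
--         if state is None:
--             state = nextState;
--             counter = 1;
--         else:
--             if (state == nextState):
--                 counter += 1;
--             else:
--                 cigars.append((state, counter));
--                 counter = 1;
--                 state = nextState;
--
--     if counter > 0:
--         cigars.append((state, counter));
--         counter = 0;
--         state = None;
--
--     return cigars;
-- ===== SOURCE B (Python) =====
-- BAM_CMATCH = 0
-- BAM_CINS = 1
-- BAM_CDEL = 2
--
-- def _op(item):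
--     if item[0] == '-':
--         if item[1] == '-':
--             raise ValueError("Unknown type of alignment entry")
--         return BAM_CINS
--     if item[1] == '-':
--         return BAM_CDEL
--     return BAM_CMATCH
--
-- def _rle(ops):
--     # recursive run splitter: peel off the leading run, recurse on the remainder
--     if not ops:
--         return []
--     op = ops[0]
--     rest = ops[1:]
--     k = 0
--     while k < len(rest) and rest[k] == op:
--         k += 1
--     return [(op, 1 + k)] + _rle(rest[k:])
--
-- def alnToCigar(alignment):
--     return _rle([_op(item) for item in alignment])
-- ===== Notes on version B (the rewrite author's own statement) =====
-- stated objective: alternative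
-- what changed: Replaces A's single fused loop with pending state/counter and a final flush by an eager classify pass followed by a recursive run splitter that peels off each maximal leading run (measuring its length) and recurses on the remainder of the op list.
import Mathlib
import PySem

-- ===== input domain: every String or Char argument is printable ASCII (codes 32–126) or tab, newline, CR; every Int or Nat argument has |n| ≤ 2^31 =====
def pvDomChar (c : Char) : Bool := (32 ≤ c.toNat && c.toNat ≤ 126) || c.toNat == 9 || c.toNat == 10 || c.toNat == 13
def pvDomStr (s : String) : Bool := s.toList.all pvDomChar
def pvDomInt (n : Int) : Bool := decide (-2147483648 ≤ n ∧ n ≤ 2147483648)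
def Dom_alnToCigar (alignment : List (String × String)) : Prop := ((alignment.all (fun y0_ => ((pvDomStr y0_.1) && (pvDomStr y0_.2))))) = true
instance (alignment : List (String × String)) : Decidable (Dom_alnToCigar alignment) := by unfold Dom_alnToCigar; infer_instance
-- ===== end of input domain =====

-- B classifies eagerly and then run-length encodes by recursively peeling maximal leading
-- runs; return values proved equal on alignments without double-gap entries (both raise there).

-- ===== PORT A =====
-- A's branch chain computing nextState; the final 'else' is Python's raise ValueError
-- (excluded by Pre_); the value 0 there is a placeholder never relied on.
def classifyA (p : String × String) : Int :=
  if p.1 ≠ "-" ∧ p.2 ≠ "-" then 0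
  else if p.1 = "-" ∧ p.2 ≠ "-" then 1
  else if p.1 ≠ "-" ∧ p.2 = "-" then 2
  else 0

def stepA (acc : Option Int × Int × List (Int × Int)) (item : String × String) :
    Option Int × Int × List (Int × Int) :=
  let nextState := classifyA item
  match acc with
  | (none, _, cigars) => (some nextState, 1, cigars)
  | (some st, counter, cigars) =>
      if st = nextState then (some st, counter + 1, cigars)
      else (some nextState, 1, cigars ++ [(st, counter)])

def alnToCigar (alignment : List (String × String)) : List (Int × Int) :=
  let acc := alignment.foldl stepA (none, 0, [])
  match acc with
  | (state, counter, cigars) =>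
      if counter > 0 then cigars ++ [(state.getD 0, counter)] else cigars

-- ===== PORT B =====
-- B's _op helper; the double-gap branch is Python's raise ValueError (excluded by Pre_);
-- the value 1 there is a placeholder never relied on.
def classifyB (p : String × String) : Int :=
  if p.1 = "-" then (if p.2 = "-" then 1 else 1)
  else if p.2 = "-" then 2 else 0

-- B's _rle: the while loop counting the equal leading prefix of rest is takeWhile's
-- length k, and rest[k:] is dropWhile; structural recursion on the remainder.
def rleB : List Int → List (Int × Int)
  | [] => []
  | op :: rest =>
      (op, 1 + ((rest.takeWhile (fun x => x == op)).length : Int)) ::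
        rleB (rest.dropWhile (fun x => x == op))
  termination_by l => l.length
  decreasing_by
    simpa using Nat.lt_succ_of_le (List.length_dropWhile_le _ _)

def alnToCigar_alt (alignment : List (String × String)) : List (Int × Int) :=
  rleB (alignment.map classifyB)

-- ===== PRECONDITION & SPEC =====
-- Pre_ excludes alignments containing an entry with '-' on both sides: Python A (and B)
-- raise ValueError there.
def Pre_alnToCigar (alignment : List (String × String)) : Prop :=
  ∀ p ∈ alignment, ¬(p.1 = "-" ∧ p.2 = "-")
instance (alignment : List (String × String)) : Decidable (Pre_alnToCigar alignment) := by
  unfold Pre_alnToCigar; infer_instance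
def pvWitness_alnToCigar : (List (String × String)) := [("A", "A"), ("-", "C"), ("G", "-")]

def Spec_alnToCigar (alignment : List (String × String)) (out : List (Int × Int)) : Prop :=
  out = alnToCigar_alt alignment
instance (alignment : List (String × String)) (out : List (Int × Int)) :
    Decidable (Spec_alnToCigar alignment out) := by unfold Spec_alnToCigar; infer_instance

-- ===== CLAIM (what is proved, stated in full; the proofs are below) =====
def Claim_equal_alnToCigar : Prop := ∀ (alignment : List (String × String)),
  Dom_alnToCigar alignment → Pre_alnToCigar alignment →
  Spec_alnToCigar alignment (alnToCigar alignment)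

-- ===== LEMMAS AND PROOFS =====

-- proof-only view of A's final flush on the loop state
def finishA (acc : Option Int × Int × List (Int × Int)) : List (Int × Int) :=
  if acc.2.1 > 0 then acc.2.2 ++ [(acc.1.getD 0, acc.2.1)] else acc.2.2

lemma match_eq_finishA (acc : Option Int × Int × List (Int × Int)) :
    (match acc with
     | (state, counter, cigars) =>
         if counter > 0 then cigars ++ [(state.getD 0, counter)] else cigars) = finishA acc := by
  rcases acc with ⟨s, c, cg⟩; rfl

lemma classify_eq (p : String × String) (h : ¬(p.1 = "-" ∧ p.2 = "-")) :
    classifyA p = classifyB p := by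
  unfold classifyA classifyB
  by_cases h1 : p.1 = "-" <;> by_cases h2 : p.2 = "-" <;> simp_all

-- the current-run view of A's loop state, consumed run by run
def rleRun (st c : Int) : List Int → List (Int × Int)
  | [] => [(st, c)]
  | op :: rest => if op = st then rleRun st (c + 1) rest
                  else (st, c) :: rleRun op 1 rest

lemma rleRun_eq_rleB (ops : List Int) : ∀ (st c : Int),
    rleRun st c ops =
      (st, c + ((ops.takeWhile (fun x => x == st)).length : Int)) ::
        rleB (ops.dropWhile (fun x => x == st)) := by
  induction ops with
  | nil => intro st c; simp [rleRun, rleB]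
  | cons op rest ih =>
      intro st c
      by_cases h : op = st
      · simp only [rleRun, ih st (c + 1), List.takeWhile_cons,
          List.dropWhile_cons, h, beq_self_eq_true, if_true]
        simp
        ring_nf
      · simp only [rleRun, if_neg h, List.takeWhile_cons, List.dropWhile_cons,
          show (op == st) = false by simpa using h]
        simp only [if_false, Bool.false_eq_true, List.length_nil]
        rw [rleB, ← ih op 1]
        simp

lemma stepA_some (p : String × String) (hp : ¬(p.1 = "-" ∧ p.2 = "-"))
    (st c : Int) (cs : List (Int × Int)) :
    stepA (some st, c, cs) p =
      (if classifyB p = st then (some st, c + 1, cs)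
       else (some (classifyB p), 1, cs ++ [(st, c)])) := by
  simp only [stepA, classify_eq p hp]
  by_cases h : classifyB p = st
  · rw [if_pos h.symm, if_pos h]
  · rw [if_neg (fun e => h e.symm), if_neg h]

lemma loop_eq (l : List (String × String)) : ∀ (st c : Int) (cs : List (Int × Int)),
    0 < c → (∀ p ∈ l, ¬(p.1 = "-" ∧ p.2 = "-")) →
    finishA (l.foldl stepA (some st, c, cs)) = cs ++ rleRun st c (l.map classifyB) := by
  induction l with
  | nil =>
      intro st c cs hc _
      simp [finishA, hc, rleRun]
  | cons p rest ih =>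
      intro st c cs hc hpre
      have hp : ¬(p.1 = "-" ∧ p.2 = "-") := hpre p (List.mem_cons_self ..)
      have hrest : ∀ q ∈ rest, ¬(q.1 = "-" ∧ q.2 = "-") :=
        fun q hq => hpre q (List.mem_cons_of_mem _ hq)
      simp only [List.foldl_cons, List.map_cons, stepA_some p hp]
      by_cases h : classifyB p = st
      · rw [if_pos h, ih st (c + 1) cs (by omega) hrest, rleRun, if_pos h]
      · rw [if_neg h, ih (classifyB p) 1 (cs ++ [(st, c)]) (by omega) hrest,
          rleRun, if_neg h]
        simp

lemma main_eq (alignment : List (String × String)) (hpre : Pre_alnToCigar alignment) :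
    alnToCigar alignment = alnToCigar_alt alignment := by
  unfold alnToCigar alnToCigar_alt
  rw [match_eq_finishA]
  cases alignment with
  | nil => simp [finishA, rleB]
  | cons p rest =>
      have hp : ¬(p.1 = "-" ∧ p.2 = "-") := hpre p (List.mem_cons_self ..)
      have hrest : ∀ q ∈ rest, ¬(q.1 = "-" ∧ q.2 = "-") :=
        fun q hq => hpre q (List.mem_cons_of_mem _ hq)
      simp only [List.foldl_cons, List.map_cons]
      rw [show stepA (none, 0, []) p = (some (classifyB p), 1, []) by
            simp [stepA, classify_eq p hp]]
      rw [loop_eq rest (classifyB p) 1 [] (by omega) hrest,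
          rleB, ← rleRun_eq_rleB]
      simp

-- ===== VERDICT (by name: the statement is the Claim_ definition above) =====
theorem alnToCigar_spec : Claim_equal_alnToCigar := by
  intro alignment _ hpre
  unfold Spec_alnToCigar
  exact main_eq alignment hpre
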